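-- pv_equiv track=rewrite | github.com/xyaocao/CQS-SMART | utils/ppl_loader_new.py | format_column_meaning
-- ===== SOURCE A (Python) =====
-- from typing import Dict, Any, List, Optional
--
-- def format_column_meaning(column_meaning: Dict[str, str]) -> str:
--     """Format column_meaning dict into readable text."""
--     if not column_meaning:
--         return ""
--
--     lines = ["### Column Meanings (what each column represents):"]
--     tables = {}
--
--     for col_key, meaning in column_meaning.items():
--         parts = col_key.split('.')
--         if len(parts) == 2:
--             table, col = parts
--         else:
--             table, col = 'unknown', col_key
--
--         if table not in tables:
--             tables[table] = []
--         tables[table].append(f"  - {col} → \"{meaning}\"")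
--
--     for table, cols in sorted(tables.items()):
--         lines.append(f"# {table}:")
--         lines.extend(cols)
--
--     return '\n'.join(lines)
-- ===== SOURCE B (Python) =====
-- def format_column_meaning(column_meaning):
--     """Format column_meaning dict into readable text."""
--     if not column_meaning:
--         return ""
--     entries = []
--     for col_key, meaning in column_meaning.items():
--         parts = col_key.split('.')
--         table, col = parts if len(parts) == 2 else ('unknown', col_key)
--         entries.append((table, f'  - {col} → "{meaning}"'))
--     lines = ["### Column Meanings (what each column represents):"]
--     for table in sorted({t for t, _ in entries}):
--         lines.append(f"# {table}:")
--         lines.extend(line for t, line in entries if t == table)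
--     return '\n'.join(lines)
-- ===== Notes on version B (the rewrite author's own statement) =====
-- stated objective: alternative
-- what changed: Replaces A's group-into-a-dict-of-lists-then-sort-keys shape by a dict-free decomposition: compute (table, line) pairs once, sort the distinct table names, and emit each table's block by filtering the pair list.
import Mathlib
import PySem

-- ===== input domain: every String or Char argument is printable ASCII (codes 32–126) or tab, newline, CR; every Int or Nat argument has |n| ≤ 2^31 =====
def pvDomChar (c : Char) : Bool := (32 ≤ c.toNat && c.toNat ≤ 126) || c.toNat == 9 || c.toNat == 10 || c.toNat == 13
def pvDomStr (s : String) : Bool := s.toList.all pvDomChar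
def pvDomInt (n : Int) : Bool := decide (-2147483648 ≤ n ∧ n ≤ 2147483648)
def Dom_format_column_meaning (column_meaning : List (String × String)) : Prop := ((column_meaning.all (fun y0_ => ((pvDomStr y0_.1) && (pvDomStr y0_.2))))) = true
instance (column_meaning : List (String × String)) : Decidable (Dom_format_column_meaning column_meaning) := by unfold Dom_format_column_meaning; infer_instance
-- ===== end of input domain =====

-- B replaces A's group-into-a-dict-then-sort-keys shape by a dict-free one: build (table, line)
-- pairs once, sort the distinct table names, and emit each table's block by filtering the pairs.

-- ===== PORT A =====
-- 'table, col = key.split('.')' when it has exactly 2 parts, else ('unknown', key)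
def pvTC_A (key : String) : String × String :=
  match PySem.Str.split? key "." with
  | some [t, c] => (t, c)
  | _ => ("unknown", key)

def format_column_meaning (column_meaning : List (String × String)) : String :=
  if column_meaning = [] then "" else
  let lines : List String := ["### Column Meanings (what each column represents):"]
  -- Python's "if table not in tables: tables[table] = []" followed by append is exactly Dict.modify
  let tables : PySem.Dict String (List String) :=
    column_meaning.foldl (fun d p =>
      let tc := pvTC_A p.1
      d.modify tc.1 [] (· ++ ["  - " ++ tc.2 ++ " → \"" ++ p.2 ++ "\""])) PySem.Dict.empty
  -- dict keys are distinct, so Python's tuple comparison in sorted(tables.items()) only ever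
  -- compares the keys: sorting by the first component is exact here
  let lines := (PySem.List.sorted tables.items (fun q => q.1) false).foldl
      (fun acc q => (acc ++ ["# " ++ q.1 ++ ":"]) ++ q.2) lines
  PySem.Str.join "\n" lines

-- ===== PORT B =====
def pvEntry_B (p : String × String) : String × String :=
  match PySem.Str.split? p.1 "." with
  | some [t, c] => (t, "  - " ++ c ++ " → \"" ++ p.2 ++ "\"")
  | _ => ("unknown", "  - " ++ p.1 ++ " → \"" ++ p.2 ++ "\"")

def format_column_meaning_alt (column_meaning : List (String × String)) : String :=
  if column_meaning = [] then "" else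
  let entries : List (String × String) :=
    column_meaning.foldl (fun acc p => acc ++ [pvEntry_B p]) []
  let lines : List String := ["### Column Meanings (what each column represents):"]
  let lines := (PySem.List.sorted (PySem.Set.ofList (entries.map (·.1))) (fun t => t) false).foldl
      (fun acc t => (acc ++ ["# " ++ t ++ ":"]) ++ (entries.filter (fun e => e.1 == t)).map (·.2)) lines
  PySem.Str.join "\n" lines

-- ===== PRECONDITION & SPEC =====
-- The Python argument is a dict, whose keys are necessarily distinct; Pre_ restricts the
-- association-list representation to distinct keys, since a duplicate-key list represents no dict.
def Pre_format_column_meaning (column_meaning : List (String × String)) : Prop :=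
  (column_meaning.map (·.1)).Nodup
instance (column_meaning : List (String × String)) : Decidable (Pre_format_column_meaning column_meaning) := by unfold Pre_format_column_meaning; infer_instance

def pvWitness_format_column_meaning : (List (String × String)) := [("t.a", "x"), ("b", "y"), ("t.c", "z")]

def Spec_format_column_meaning (column_meaning : List (String × String)) (out : String) : Prop := out = format_column_meaning_alt column_meaning
instance (column_meaning : List (String × String)) (out : String) : Decidable (Spec_format_column_meaning column_meaning out) := by unfold Spec_format_column_meaning; infer_instance

-- ===== CLAIM (what is proved, stated in full; the proofs are below) =====
def Claim_equal_format_column_meaning : Prop := ∀ (column_meaning : List (String × String)), Dom_format_column_meaning column_meaning → Pre_format_column_meaning column_meaning → Spec_format_column_meaning column_meaning (format_column_meaning column_meaning)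

-- ===== LEMMAS AND PROOFS =====

-- the (table, line) pair both programs compute from one dict item
def pvG (p : String × String) : String × String :=
  ((pvTC_A p.1).1, "  - " ++ (pvTC_A p.1).2 ++ " → \"" ++ p.2 ++ "\"")

theorem pvEntry_eq (p : String × String) : pvEntry_B p = pvG p := by
  unfold pvEntry_B pvG pvTC_A
  rcases h : PySem.Str.split? p.1 "." with _ | l
  · rfl
  · match l with
    | [] => rfl
    | [a] => rfl
    | [a, b] => rfl
    | a :: b :: c :: r => rfl

def pvGrp (es : List (String × String)) (t : String) : List String :=
  (es.filter (fun q => q.1 == t)).map (·.2)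

def pvTs (es : List (String × String)) : List String :=
  PySem.List.sorted (PySem.Set.ofList (es.map (·.1))) (fun t => t) false

def pvDictOf (es : List (String × String)) : PySem.Dict String (List String) :=
  es.foldl (fun d p => d.modify p.1 [] (fun x => x ++ [p.2])) PySem.Dict.empty

theorem pvDict_keys (es : List (String × String)) :
    (pvDictOf es).keys = PySem.Set.ofList (es.map (·.1)) := by
  have h := PySem.Dict.keys_foldl_modify_key es Prod.fst ([] : List String)
      (fun _ p => (fun x => x ++ [p.2])) PySem.Dict.empty
  have h2 : (pvDictOf es).keys = PySem.Set.update (PySem.Dict.empty (κ := String) (ν := List String)).keys (es.map Prod.fst) := h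
  rw [h2, PySem.Dict.keys_empty, PySem.Set.update_eq_append_filter]
  simp [PySem.Set.contains]

theorem pvDict_keys_nodup (es : List (String × String)) : (pvDictOf es).keys.Nodup := by
  have h := PySem.Dict.nodup_keys_foldl_modify_key es Prod.fst ([] : List String)
      (fun _ p => (fun x => x ++ [p.2])) PySem.Dict.empty (by simp [PySem.Dict.keys_empty])
  exact h

theorem pvDict_items (es : List (String × String)) :
    (pvDictOf es).items = (PySem.Set.ofList (es.map (·.1))).map (fun t => (t, pvGrp es t)) := by
  rw [PySem.Dict.items_eq_map_keys (pvDictOf es) (pvDict_keys_nodup es) [], pvDict_keys]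
  refine List.map_congr_left (fun t ht => ?_)
  have h := PySem.Dict.getD_foldl_modify_append es PySem.Dict.empty t
  have h2 : (pvDictOf es).getD t [] = PySem.Dict.empty.getD t [] ++ (es.filter (fun p => p.1 == t)).map (·.2) := h
  rw [h2, PySem.Dict.getD_empty]
  rfl

theorem pvSorted_items (es : List (String × String)) :
    PySem.List.sorted (pvDictOf es).items (fun q => q.1) false
      = (pvTs es).map (fun t => (t, pvGrp es t)) := by
  apply PySem.List.sorted_eq_of_perm_of_pairwise_lt
  · rw [pvDict_items]
    exact (PySem.List.sorted_perm (PySem.Set.ofList (es.map (·.1))) (fun t => t) false).map _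
  · rw [List.pairwise_map]
    exact PySem.List.sorted_ofList_pairwise_lt (es.map (·.1))

-- ===== VERDICT (by name: the statement is the Claim_ definition above) =====
theorem format_column_meaning_spec : Claim_equal_format_column_meaning := by
  intro cm _ _
  unfold Spec_format_column_meaning format_column_meaning format_column_meaning_alt
  by_cases hcm : cm = []
  · simp [hcm]
  · simp only [if_neg hcm]
    set es := cm.map pvG with hes
    have hentries : cm.foldl (fun acc p => acc ++ [pvEntry_B p]) [] = es := by
      rw [PySem.List.foldl_append_singleton_eq_map, List.nil_append]
      exact List.map_congr_left (fun p _ => pvEntry_eq p)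
    have hdict : (cm.foldl (fun d p =>
        let tc := pvTC_A p.1
        d.modify tc.1 [] (fun x => x ++ ["  - " ++ tc.2 ++ " → \"" ++ p.2 ++ "\""])) PySem.Dict.empty)
        = pvDictOf es := by
      rw [hes]
      rw [pvDictOf, List.foldl_map]
      rfl
    rw [hentries, hdict, pvSorted_items]
    have hA : ((pvTs es).map (fun t => (t, pvGrp es t))).foldl
        (fun acc q => (acc ++ ["# " ++ q.1 ++ ":"]) ++ q.2)
        ["### Column Meanings (what each column represents):"]
        = (pvTs es).foldl
        (fun acc t => (acc ++ ["# " ++ t ++ ":"]) ++ (es.filter (fun e => e.1 == t)).map (·.2))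
        ["### Column Meanings (what each column represents):"] := by
      rw [List.foldl_map]
      rfl
    rw [hA]
    rfl
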